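-- pv_equiv track=rewrite | github.com/joshnieuwstad/specno-dev-event | Question3/Question3.py | answer
-- ===== SOURCE A (Python) =====
-- def answer(s,n):
--     sum = 0
--     z = len(s)
--     l = []
--     if n > z:
--         for k in s:
--             l.append(k)
--         for j in range(n-len(s)):
--             for i in range(z):
--                 sum += s[len(s)-1-i]
--             s.append(sum)
--             sum = 0
--         return s
--     else:
--         return s[:n]
-- ===== SOURCE B (Python) =====
-- # Sliding-window extension via a running window sum updated incrementally instead of re-summing the window each step.
-- # A mutates s in place (appends to it); B leaves s untouched -- equivalence is about the return value.
-- def answer(s, n):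
--     z = len(s)
--     if n <= z:
--         return s[:n]
--     out = list(s)
--     w = sum(s)  # sum of the last z elements (initially all of s)
--     for _ in range(n - z):
--         out.append(w)
--         w = 2 * w - out[len(out) - 1 - z]  # slide: add the new element w, drop the outgoing one
--     return out
-- ===== Notes on version B (the rewrite author's own statement) =====
-- stated objective: alternative
-- what changed: Replaces the inner loop that re-sums the last z elements at every step with a single running window sum updated per appended element (add the new element, subtract the outgoing one).
import Mathlib
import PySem

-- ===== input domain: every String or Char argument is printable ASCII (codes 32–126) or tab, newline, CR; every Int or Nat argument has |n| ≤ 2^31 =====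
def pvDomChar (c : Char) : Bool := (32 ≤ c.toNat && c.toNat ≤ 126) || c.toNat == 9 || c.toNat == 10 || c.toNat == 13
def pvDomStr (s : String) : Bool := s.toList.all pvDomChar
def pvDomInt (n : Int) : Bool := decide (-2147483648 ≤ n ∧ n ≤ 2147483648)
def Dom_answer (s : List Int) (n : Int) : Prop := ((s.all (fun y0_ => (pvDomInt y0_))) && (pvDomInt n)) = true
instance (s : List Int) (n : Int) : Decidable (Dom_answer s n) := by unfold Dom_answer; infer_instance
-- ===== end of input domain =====

-- B replaces A's per-step re-summation of the last z elements by a running window sum updated incrementally.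
-- A mutates its argument s in place (appends to it); the equivalence proved here is about the RETURN value only.

-- ===== PORT A =====
-- inner loop: for i in range(z): sum += s[len(s)-1-i]
def innerA (s : List Int) (z : Nat) : Int :=
  (PySem.List.pyRange 0 (z : Int) 1).foldl
    (fun acc i => acc + (PySem.List.pyGet? s ((s.length : Int) - 1 - i)).getD 0) 0

-- outer loop: for j in range(n-len(s)): … s.append(sum); sum = 0
def loopA (z : Nat) : Nat → List Int → List Int
  | 0, s => s
  | k+1, s => loopA z k (s ++ [innerA s z])

def answer (s : List Int) (n : Int) : List Int :=
  if n > (s.length : Int) then loopA s.length (n - (s.length : Int)).toNat s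
  else PySem.List.slice s none (some n)

-- ===== PORT B =====
-- for _ in range(n-z): out.append(w); w = 2*w - out[len(out)-1-z]
def loopB (z : Nat) : Nat → List Int → Int → List Int
  | 0, out, _ => out
  | k+1, out, w =>
      let out' := out ++ [w]
      loopB z k out' (2 * w - (PySem.List.pyGet? out' ((out'.length : Int) - 1 - (z : Int))).getD 0)

def answer_alt (s : List Int) (n : Int) : List Int :=
  if n ≤ (s.length : Int) then PySem.List.slice s none (some n)
  else loopB s.length (n - (s.length : Int)).toNat s s.sum

-- ===== PRECONDITION & SPEC =====
def Spec_answer (s : List Int) (n : Int) (out : List Int) : Prop := out = answer_alt s n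
instance (s : List Int) (n : Int) (out : List Int) : Decidable (Spec_answer s n out) := by unfold Spec_answer; infer_instance

-- ===== CLAIM (what is proved, stated in full; the proofs are below) =====
def Claim_equal_answer : Prop := ∀ (s : List Int) (n : Int), Dom_answer s n → Spec_answer s n (answer s n)

-- ===== LEMMAS AND PROOFS =====

-- A's inner loop computes the sum of the last z elements of t (i.e. the first z of t.reverse).
lemma mapA_eq (t : List Int) : ∀ (z : Nat), z ≤ t.length →
    (PySem.List.pyRange 0 (z : Int) 1).map
      (fun i => (PySem.List.pyGet? t ((t.length : Int) - 1 - i)).getD 0) = t.reverse.take z := by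
  intro z
  induction z with
  | zero => intro _; simp [PySem.List.pyRange_one_eq_nil]
  | succ z ih =>
    intro hz
    have h0 : (0 : Int) ≤ (z : Int) := by omega
    rw [show ((z + 1 : Nat) : Int) = (z : Int) + 1 by push_cast; ring,
        PySem.List.pyRange_one_succ_right h0, List.map_append, ih (by omega),
        List.map_singleton]
    have hidx : ((t.length : Int) - 1 - (z : Int)) = ((t.length - 1 - z : Nat) : Int) := by
      omega
    have hlt : t.length - 1 - z < t.length := by omega
    rw [hidx, PySem.List.pyGet?_natCast, List.getElem?_eq_getElem hlt]
    have hrev : t.reverse[z]? = some t[t.length - 1 - z] := by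
      rw [List.getElem?_eq_getElem (by simpa using (by omega : z < t.length))]
      simp [List.getElem_reverse]
    rw [List.take_add_one, hrev]
    simp

lemma innerA_eq (t : List Int) (z : Nat) (hz : z ≤ t.length) :
    innerA t z = (t.reverse.take z).sum := by
  unfold innerA
  rw [PySem.List.foldl_add, mapA_eq t z hz]
  simp

-- Main invariant: if w is the sum of the last z elements of t, the two loops agree.
lemma loop_eq (z : Nat) : ∀ (k : Nat) (t : List Int) (w : Int),
    z ≤ t.length → w = (t.reverse.take z).sum → loopA z k t = loopB z k t w := by
  intro k
  induction k with
  | zero => intro t w _ _; rfl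
  | succ k ih =>
    intro t w hz hw
    have hA : innerA t z = w := by rw [innerA_eq t z hz, hw]
    show loopA z k (t ++ [innerA t z]) = loopB z (k+1) t w
    rw [hA]
    unfold loopB
    simp only []
    apply ih
    · simp; omega
    · -- new window sum: 2*w - outgoing = sum of last z of t ++ [w]
      have hlen : (((t ++ [w]).length : Int) - 1 - (z : Int)) = ((t.length - z : Nat) : Int) := by
        simp; omega
      rw [hlen, PySem.List.pyGet?_natCast]
      have hrevapp : (t ++ [w]).reverse = w :: t.reverse := by simp
      rcases Nat.eq_zero_or_pos z with hz0 | hzpos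
      · subst hz0
        have : (t ++ [w])[t.length - 0]? = some w := by
          simp
        rw [this, hrevapp]
        simp at hw ⊢
        omega
      · have hlt : t.length - z < t.length := by omega
        have hget : (t ++ [w])[t.length - z]? = some t[t.length - z] := by
          rw [List.getElem?_append_left hlt]
          exact List.getElem?_eq_getElem hlt
        rw [hget, hrevapp]
        -- take z of (w :: t.reverse) = w :: take (z-1) of t.reverse
        obtain ⟨z', rfl⟩ : ∃ z', z = z' + 1 := ⟨z - 1, by omega⟩
        have hrevz : t.reverse[z']? = some t[t.length - (z' + 1)] := by
          rw [List.getElem?_eq_getElem (by simpa using (by omega : z' < t.length))]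
          congr 1
          rw [List.getElem_reverse]
          congr 1
          omega
        have hwsum : w = (t.reverse.take z').sum + t[t.length - (z' + 1)] := by
          rw [hw, List.take_add_one, List.sum_append, hrevz]; simp
        rw [List.take_succ_cons, List.sum_cons, List.take_add_one] at *
        simp only [Option.getD_some]
        rw [hwsum]
        ring

-- ===== VERDICT (by name: the statement is the Claim_ definition above) =====
theorem answer_spec : Claim_equal_answer := by
  intro s n _
  unfold Spec_answer answer answer_alt
  rcases lt_or_ge (s.length : Int) n with h | h
  · rw [if_pos h, if_neg (by omega)]
    exact loop_eq s.length _ s s.sum (le_refl _) (by rw [show s.length = s.reverse.length from (List.length_reverse).symm, List.take_length, List.sum_reverse])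
  · rw [if_neg (by omega), if_pos h]
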